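-- pv_equiv track=rewrite | github.com/nickhand/pyRSD | pyRSD/rsdfit/rsdfit.py | split_ranks
-- ===== SOURCE A (Python) =====
-- def split_ranks(N_ranks, N_chunks):
--     """
--     Divide the ranks into N chunks, removing the master (0) rank
--     """
--     seq = range(N_ranks)
--     avg = int(N_ranks // N_chunks)
--     remainder = N_ranks % N_chunks
--
--     start = 0
--     end = avg
--     for i in range(N_chunks):
--         if remainder:
--             end += 1
--             remainder -= 1
--         yield i, seq[start:end]
--         start = end
--         end += avg
-- ===== SOURCE B (Python) =====
-- def split_ranks(N_ranks, N_chunks):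
--     """
--     Divide the ranks into N chunks, removing the master (0) rank
--     """
--     seq = range(N_ranks)
--     avg = int(N_ranks // N_chunks)
--     remainder = N_ranks % N_chunks
--     for i in range(N_chunks):
--         start = i * avg + min(i, remainder)
--         end = start + avg + (1 if i < remainder else 0)
--         yield i, seq[start:end]
-- ===== Notes on version B (the rewrite author's own statement) =====
-- stated objective: alternative
-- what changed: Replaces A's carried start/end/remainder accumulator (updated across iterations) with an independent closed-form computation of each chunk's bounds per index (start = i*avg + min(i, remainder)).
import Mathlib
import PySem

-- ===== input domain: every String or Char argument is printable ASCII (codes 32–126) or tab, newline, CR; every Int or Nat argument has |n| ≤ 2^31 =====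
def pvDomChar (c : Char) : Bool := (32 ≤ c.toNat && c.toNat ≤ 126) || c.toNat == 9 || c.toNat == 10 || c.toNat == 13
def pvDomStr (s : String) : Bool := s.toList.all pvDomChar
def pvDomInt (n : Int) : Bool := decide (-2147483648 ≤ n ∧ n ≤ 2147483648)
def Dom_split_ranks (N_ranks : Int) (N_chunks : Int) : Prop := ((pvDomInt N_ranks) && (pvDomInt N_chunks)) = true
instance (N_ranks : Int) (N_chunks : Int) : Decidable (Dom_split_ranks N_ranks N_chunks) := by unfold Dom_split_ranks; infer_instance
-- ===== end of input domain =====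

-- B replaces A's carried start/end/remainder accumulator by a closed-form per-index
-- computation of each chunk's bounds (objective: simpler/alternative, same cost).
-- Both Pythons are generators; equivalence is about the yielded sequence, materialised as a list.

-- ===== PORT A =====
-- Python's seq = range(N_ranks) is a LAZY range object and seq[a:b] is range slicing
-- (CPython slice-index clamping, O(1)); we port seq by its bound N and the slice exactly:
-- range(N)[a:b] = pyRange a' b' 1 with the clamped indices a', b' (identity range, index = value).
def rangeSlice (N a b : Int) : List Int :=
  let len : Int := max 0 N
  let a' := if a < 0 then max 0 (len + a) else min a len
  let b' := if b < 0 then max 0 (len + b) else min b len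
  PySem.List.pyRange a' b' 1

-- loop body of A: state (start, end, remainder, acc); 'if remainder:' is Python truthiness (≠ 0)
def stepA (seq : Int) (avg : Int)
    (st : Int × Int × Int × List (Int × List Int)) (i : Int) :
    Int × Int × Int × List (Int × List Int) :=
  let start := st.1
  let e := if st.2.2.1 ≠ 0 then st.2.1 + 1 else st.2.1
  let rem := if st.2.2.1 ≠ 0 then st.2.2.1 - 1 else st.2.2.1
  (e, e + avg, rem, st.2.2.2 ++ [(i, rangeSlice seq start e)])

def split_ranks (N_ranks : Int) (N_chunks : Int) : List (Int × List Int) :=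
  let seq := N_ranks   -- the range object, represented by its bound (see rangeSlice)
  let avg := PySem.Int.floordiv N_ranks N_chunks
  let remainder := PySem.Int.mod N_ranks N_chunks
  ((PySem.List.pyRange 0 N_chunks 1).foldl (stepA seq avg) (0, avg, remainder, [])).2.2.2

-- ===== PORT B =====
-- B's per-index chunk: start = i*avg + min(i, remainder); end = start + avg + (1 if i < remainder else 0)
def chunkB (seq : Int) (avg remainder i : Int) : Int × List Int :=
  let start := i * avg + min i remainder
  let e := start + avg + (if i < remainder then 1 else 0)
  (i, rangeSlice seq start e)

def split_ranks_alt (N_ranks : Int) (N_chunks : Int) : List (Int × List Int) :=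
  let seq := N_ranks   -- the range object, represented by its bound (see rangeSlice)
  let avg := PySem.Int.floordiv N_ranks N_chunks
  let remainder := PySem.Int.mod N_ranks N_chunks
  (PySem.List.pyRange 0 N_chunks 1).map (chunkB seq avg remainder)

-- ===== PRECONDITION & SPEC =====
-- Pre_ excludes exactly N_chunks = 0, where both Pythons raise ZeroDivisionError.
def Pre_split_ranks (N_ranks : Int) (N_chunks : Int) : Prop := N_chunks ≠ 0
instance (N_ranks : Int) (N_chunks : Int) : Decidable (Pre_split_ranks N_ranks N_chunks) := by unfold Pre_split_ranks; infer_instance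
def pvWitness_split_ranks : Int × Int := (7, 3)

def Spec_split_ranks (N_ranks : Int) (N_chunks : Int) (out : List (Int × List Int)) : Prop := out = split_ranks_alt N_ranks N_chunks
instance (N_ranks : Int) (N_chunks : Int) (out : List (Int × List Int)) : Decidable (Spec_split_ranks N_ranks N_chunks out) := by unfold Spec_split_ranks; infer_instance

-- ===== CLAIM (what is proved, stated in full; the proofs are below) =====
def Claim_equal_split_ranks : Prop := ∀ (N_ranks : Int) (N_chunks : Int), Dom_split_ranks N_ranks N_chunks → Pre_split_ranks N_ranks N_chunks → Spec_split_ranks N_ranks N_chunks (split_ranks N_ranks N_chunks)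

-- ===== LEMMAS AND PROOFS =====

-- Loop invariant: after n iterations A's state is the closed form B uses.
theorem loopA_inv (seq : Int) (avg rem0 : Int) (h0 : 0 ≤ rem0) :
    ∀ n : Int, 0 ≤ n →
    (PySem.List.pyRange 0 n 1).foldl (stepA seq avg) (0, avg, rem0, []) =
      (n * avg + min n rem0, n * avg + min n rem0 + avg, rem0 - min n rem0,
       (PySem.List.pyRange 0 n 1).map (chunkB seq avg rem0)) := by
  intro n hn
  induction n, hn using Int.le_induction with
  | base =>
      rw [PySem.List.pyRange_one_eq_nil (le_refl 0)]
      simp [min_eq_left h0]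
  | succ n hn ih =>
      rw [PySem.List.pyRange_one_succ_right hn, List.foldl_append, List.map_append, ih]
      simp only [List.foldl_cons, List.foldl_nil, List.map_cons, List.map_nil, stepA, chunkB]
      have hm : (n + 1) * avg = n * avg + avg := by ring
      rw [hm]
      by_cases hc : n < rem0
      · have h1 : rem0 - min n rem0 ≠ 0 := by omega
        have ha : min (n + 1) rem0 = min n rem0 + 1 := by omega
        simp only [if_pos h1, if_pos hc, ha, Prod.mk.injEq]
        refine ⟨?g1, ?g2, ?g3, ?g4⟩
        case g1 => ring
        case g2 => ring
        case g3 => omega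
        case g4 => trivial
      · have h1 : ¬ (rem0 - min n rem0 ≠ 0) := by omega
        have ha : min (n + 1) rem0 = min n rem0 := by
          rw [min_eq_right (by omega), min_eq_right (by omega)]
        simp only [if_neg h1, if_neg hc, ha, add_zero, Prod.mk.injEq]
        refine ⟨by ring, by ring, trivial⟩

theorem split_ranks_spec : Claim_equal_split_ranks := by
  intro N_ranks N_chunks _ hpre
  unfold Spec_split_ranks split_ranks split_ranks_alt
  dsimp only
  by_cases hpos : 0 < N_chunks
  · have h0 : 0 ≤ PySem.Int.mod N_ranks N_chunks := PySem.Int.mod_nonneg _ hpos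
    rw [loopA_inv _ _ _ h0 N_chunks (le_of_lt hpos)]
  · rw [PySem.List.pyRange_one_eq_nil (by omega : N_chunks ≤ 0)]
    simp
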